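-- pv_equiv track=rewrite | github.com/Philex5/ShuaTi | DrasticPlan/ShortestPathOfGraph.py | minHeapPop
-- ===== SOURCE A (Python) =====
-- def minHeapPop(dis):
--     """
--     使用最小堆优化寻找最短距离，这里每轮构造一个堆，并获得堆顶的值
--     """
--     def heapConstruct(arr):
--         """
--         堆的构造: 从倒数第二层使用下沉操作,把最小值置换到堆顶
--         """
--         N = len(arr) - 1
--         k = N // 2
--         # 执行下沉操作，构造堆
--         while k >= 0:
--             sink(arr, k, N)
--             k -= 1
--
--     def heapSort(arr):
--         # 不断调整各个结点的位置
--         N = len(arr) - 1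
--         while N >= 0:
--             arr[0], arr[N] = arr[N], arr[0]
--             N -= 1
--             sink(arr, 0, N)
--
--     def heapDel(arr):
--         """
--         堆弹出堆顶值，即最小值
--         再把最后一个结点拿到堆顶，执行下沉操作
--         """
--         arr = arr[1:]
--         return heapConstruct(arr)
--
--     def heapAdd(arr, node):
--         """
--         堆增加新的结点，使用上浮操作
--         :param arr:
--         :return:
--         """
--         arr.append(node)
--         return heapConstruct(arr)
--
--     def sink(arr, k, N):
--         while k * 2 + 1 <= N:
--             j = k * 2 + 1
--             if j < N and arr[j] > arr[j+1]:
--                 j += 1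
--             if arr[k] < arr[j]:
--                 break
--             arr[k], arr[j] = arr[j], arr[k]
--             k = j
--
--     # 使用距离矩阵构建堆
--     disD = {}
--     nodes = []
--     for key in dis.keys():
--         disD[dis[key]] = key
--         nodes.append(dis[key])
--     heapConstruct(nodes)
--     node = nodes[0]
--     return disD[node], node
-- ===== SOURCE B (Python) =====
-- def minHeapPop(dis):
--     # Single linear min-scan over the values instead of building a binary heap.
--     # vals[0] raises IndexError on an empty dict, exactly like A's nodes[0].
--     vals = list(dis.values())
--     m = vals[0]
--     for v in vals[1:]:
--         if v < m:
--             m = v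
--     disD = {dis[k]: k for k in dis}  # same value->key map as A (last key wins on ties)
--     return disD[m], m
-- ===== Notes on version B (the rewrite author's own statement) =====
-- stated objective: faster
-- what changed: Replaces the hand-rolled binary-heap construction (bottom-up sink/heapify over an auxiliary array) with a single linear minimum scan over the values, keeping the same value-to-key dict for the returned key.
-- outside the precondition, e.g. on minHeapPop({}): A raises IndexError, B raises IndexError
import Mathlib
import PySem

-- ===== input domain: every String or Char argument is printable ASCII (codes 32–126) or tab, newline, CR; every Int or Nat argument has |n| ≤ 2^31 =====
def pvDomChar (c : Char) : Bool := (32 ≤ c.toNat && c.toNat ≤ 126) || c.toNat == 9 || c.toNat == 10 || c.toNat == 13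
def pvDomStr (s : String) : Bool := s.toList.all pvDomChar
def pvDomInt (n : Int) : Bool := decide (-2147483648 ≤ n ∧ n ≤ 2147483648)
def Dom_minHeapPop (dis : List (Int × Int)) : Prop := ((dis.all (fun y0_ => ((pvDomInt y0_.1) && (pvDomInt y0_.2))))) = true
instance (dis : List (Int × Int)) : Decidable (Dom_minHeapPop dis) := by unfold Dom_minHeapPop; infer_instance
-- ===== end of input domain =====

-- B replaces A's hand-rolled bottom-up binary-heap construction with a single linear
-- minimum scan over the values (measured faster by a constant factor); same value→key dict, same result.

-- ===== PORT A =====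
-- sink(arr, k, N): the while loop, with a fuel argument as a pure totality guard
-- (k strictly increases each iteration, so N.toNat + 1 steps always suffice; the fuel
-- is never exhausted on any call the function makes).  All indices touched are
-- provably in range here (0 ≤ k, j ≤ N = len-1), so List.getD / List.set are exact
-- for Python's arr[i] / arr[i] = v.
def sinkA (fuel : Nat) (arr : List Int) (k : Nat) (N : Int) : List Int :=
  match fuel with
  | 0 => arr
  | fuel + 1 =>
    if 2 * (k : Int) + 1 ≤ N then
      -- j = k*2+1; if j < N and arr[j] > arr[j+1]: j += 1
      let j : Nat := if 2 * (k : Int) + 1 < N ∧ arr.getD (2 * k + 2) 0 < arr.getD (2 * k + 1) 0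
                     then 2 * k + 2 else 2 * k + 1
      if arr.getD k 0 < arr.getD j 0 then arr
      else sinkA fuel ((arr.set k (arr.getD j 0)).set j (arr.getD k 0)) j N
    else arr

-- while k >= 0: sink(arr, k, N); k -= 1   (fuel: k decreases by 1 each iteration)
def hcLoopA (fuel : Nat) (arr : List Int) (N : Int) (k : Int) : List Int :=
  match fuel with
  | 0 => arr
  | fuel + 1 =>
    if 0 ≤ k then hcLoopA fuel (sinkA (N.toNat + 1) arr k.toNat N) N (k - 1) else arr

-- heapConstruct(arr): N = len(arr) - 1; k = N // 2; the while loop is hcLoopA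
def heapConstructA (arr : List Int) : List Int :=
  hcLoopA (arr.length + 1) arr ((arr.length : Int) - 1)
    (PySem.Int.floordiv ((arr.length : Int) - 1) 2)

def minHeapPop (dis : List (Int × Int)) : Int × Int :=
  let d := PySem.Dict.mk dis
  -- for key in dis.keys(): disD[dis[key]] = key; nodes.append(dis[key])
  let st := d.keys.foldl
      (fun (st : PySem.Dict Int Int × List Int) key =>
        (st.1.insert (d.getD key 0) key, st.2 ++ [d.getD key 0]))
      (PySem.Dict.empty, [])
  let nodes := heapConstructA st.2
  let node := nodes.getD 0 0   -- nodes[0]; in range since Pre_ gives dis ≠ []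
  (st.1.getD node 0, node)     -- disD[node] always hits: node is one of the inserted values

-- ===== PORT B =====
def minHeapPop_alt (dis : List (Int × Int)) : Int × Int :=
  let d := PySem.Dict.mk dis
  let vals := d.values
  let m0 := vals.getD 0 0      -- vals[0]; in range since Pre_ gives dis ≠ []
  -- for v in vals[1:]: if v < m: m = v
  let m := (PySem.List.slice vals (some 1) none).foldl (fun m v => if v < m then v else m) m0
  -- disD = {dis[k]: k for k in dis}
  let disD := d.keys.foldl (fun (acc : PySem.Dict Int Int) k => acc.insert (d.getD k 0) k) PySem.Dict.empty
  (disD.getD m 0, m)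

-- ===== PRECONDITION & SPEC =====
-- dis models a Python dict, so its keys are distinct (a dict cannot hold duplicate keys);
-- the empty dict is excluded because A raises IndexError at nodes[0] (B at vals[0]).
def Pre_minHeapPop (dis : List (Int × Int)) : Prop :=
  dis ≠ [] ∧ (dis.map Prod.fst).Nodup
instance (dis : List (Int × Int)) : Decidable (Pre_minHeapPop dis) := by unfold Pre_minHeapPop; infer_instance

def pvWitness_minHeapPop : (List (Int × Int)) := [(1, 3), (2, 1), (5, 4)]

def Spec_minHeapPop (dis : List (Int × Int)) (out : Int × Int) : Prop := out = minHeapPop_alt dis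
instance (dis : List (Int × Int)) (out : Int × Int) : Decidable (Spec_minHeapPop dis out) := by unfold Spec_minHeapPop; infer_instance

-- ===== CLAIM (what is proved, stated in full; the proofs are below) =====
def Claim_equal_minHeapPop : Prop := ∀ (dis : List (Int × Int)), Dom_minHeapPop dis → Pre_minHeapPop dis → Spec_minHeapPop dis (minHeapPop dis)

-- ===== LEMMAS AND PROOFS =====

-- Min-heap order property at index i of arr, for the heap occupying indices 0..N.
def heapAt (arr : List Int) (N : Int) (i : Nat) : Prop :=
  (2 * (i : Int) + 1 ≤ N → arr.getD i 0 ≤ arr.getD (2 * i + 1) 0) ∧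
  (2 * (i : Int) + 2 ≤ N → arr.getD i 0 ≤ arr.getD (2 * i + 2) 0)

theorem sinkA_length (fuel : Nat) (arr : List Int) (k : Nat) (N : Int) :
    (sinkA fuel arr k N).length = arr.length := by
  induction fuel generalizing arr k with
  | zero => rfl
  | succ fuel ih =>
    rw [sinkA]
    by_cases h : 2 * (k : Int) + 1 ≤ N
    · rw [if_pos h]
      set j : Nat := if 2 * (k : Int) + 1 < N ∧ arr.getD (2 * k + 2) 0 < arr.getD (2 * k + 1) 0
                     then 2 * k + 2 else 2 * k + 1 with hjd
      show (if arr.getD k 0 < arr.getD j 0 then arr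
            else sinkA fuel ((arr.set k (arr.getD j 0)).set j (arr.getD k 0)) j N).length = arr.length
      by_cases hb : arr.getD k 0 < arr.getD j 0
      · rw [if_pos hb]
      · rw [if_neg hb, ih]; simp
    · rw [if_neg h]

theorem sinkA_perm (fuel : Nat) (arr : List Int) (k : Nat) (N : Int) (hN : N < arr.length) :
    (sinkA fuel arr k N).Perm arr := by
  induction fuel generalizing arr k with
  | zero => rfl
  | succ fuel ih =>
    rw [sinkA]
    by_cases h : 2 * (k : Int) + 1 ≤ N
    · rw [if_pos h]
      set j : Nat := if 2 * (k : Int) + 1 < N ∧ arr.getD (2 * k + 2) 0 < arr.getD (2 * k + 1) 0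
                     then 2 * k + 2 else 2 * k + 1 with hjd
      show (if arr.getD k 0 < arr.getD j 0 then arr
            else sinkA fuel ((arr.set k (arr.getD j 0)).set j (arr.getD k 0)) j N).Perm arr
      by_cases hb : arr.getD k 0 < arr.getD j 0
      · rw [if_pos hb]
      · rw [if_neg hb]
        have hk : k < arr.length := by omega
        have hj : j < arr.length := by rw [hjd]; split <;> omega
        have hperm : ((arr.set k (arr.getD j 0)).set j (arr.getD k 0)).Perm arr := by
          have := List.set_set_perm hk hj
          simpa [List.getD_eq_getElem, hk, hj] using this
        exact (ih _ _ (by simpa using hN)).trans hperm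
    · rw [if_neg h]

theorem getD_swap (arr : List Int) (k j : Nat) (hk : k < arr.length) (hj : j < arr.length) (x : Nat) :
    ((arr.set k (arr.getD j 0)).set j (arr.getD k 0)).getD x 0 =
      if x = j then arr.getD k 0 else if x = k then arr.getD j 0 else arr.getD x 0 := by
  by_cases h1 : x = j
  · subst h1; simp [List.getD_eq_getElem?_getD, hj]
  · by_cases h2 : x = k
    · subst h2
      simp [List.getD_eq_getElem?_getD, h1, hk, Ne.symm h1]
    · simp [List.getD_eq_getElem?_getD, h1, h2, Ne.symm h1, Ne.symm h2]

theorem sinkA_heap (fuel : Nat) (arr : List Int) (k : Nat) (N : Int) (lo : Nat)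
    (hf : N.toNat + 1 ≤ fuel + k)
    (hN : N < arr.length) (hlo : lo ≤ k)
    (H : ∀ i : Nat, lo ≤ i → i ≠ k → heapAt arr N i)
    (HP : ∀ p : Nat, lo ≤ p → (k = 2 * p + 1 ∨ k = 2 * p + 2) →
      (2 * (k : Int) + 1 ≤ N → arr.getD p 0 ≤ arr.getD (2 * k + 1) 0) ∧
      (2 * (k : Int) + 2 ≤ N → arr.getD p 0 ≤ arr.getD (2 * k + 2) 0)) :
    ∀ i : Nat, lo ≤ i → heapAt (sinkA fuel arr k N) N i := by
  induction fuel generalizing arr k lo with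
  | zero =>
    -- fuel 0 forces k > N, so the loop guard is false and position k is childless
    intro i hi
    show heapAt arr N i
    by_cases hik : i = k
    · exact ⟨fun hc => absurd (by omega : ¬ 2 * (k : Int) + 1 ≤ N) (by omega),
             fun hc => absurd (by omega : ¬ 2 * (k : Int) + 1 ≤ N) (by omega)⟩
    · exact H i hi hik
  | succ fuel ih =>
    intro i hi
    rw [sinkA]
    by_cases h : 2 * (k : Int) + 1 ≤ N
    case neg =>
      rw [if_neg h]
      by_cases hik : i = k
      · exact ⟨fun hc => absurd (by omega : 2 * (k : Int) + 1 ≤ N) h,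
               fun hc => absurd (by omega : 2 * (k : Int) + 1 ≤ N) h⟩
      · exact H i hi hik
    case pos =>
    rw [if_pos h]
    set j : Nat := if 2 * (k : Int) + 1 < N ∧ arr.getD (2 * k + 2) 0 < arr.getD (2 * k + 1) 0
                   then 2 * k + 2 else 2 * k + 1 with hjd
    show heapAt (if arr.getD k 0 < arr.getD j 0 then arr
          else sinkA fuel ((arr.set k (arr.getD j 0)).set j (arr.getD k 0)) j N) N i
    have hmin : ∀ s : Nat, (s = 2 * k + 1 ∨ s = 2 * k + 2) → (s : Int) ≤ N →
        arr.getD j 0 ≤ arr.getD s 0 := by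
      intro s hs hsN
      rcases (em (2 * (k : Int) + 1 < N ∧ arr.getD (2 * k + 2) 0 < arr.getD (2 * k + 1) 0)) with hc | hc
      · obtain ⟨hc1, hc2⟩ := hc
        have hj2 : j = 2 * k + 2 := by rw [hjd, if_pos ⟨hc1, hc2⟩]
        rcases hs with rfl | rfl
        · rw [hj2]; exact le_of_lt hc2
        · rw [hj2]
      · have hj1 : j = 2 * k + 1 := by rw [hjd, if_neg hc]
        rcases hs with rfl | rfl
        · rw [hj1]
        · have : arr.getD (2 * k + 1) 0 ≤ arr.getD (2 * k + 2) 0 := by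
            rcases not_and_or.mp hc with hc' | hc'
            · exfalso; push_cast at hsN; omega
            · exact not_lt.mp hc'
          rw [hj1]; exact this
    by_cases hb : arr.getD k 0 < arr.getD j 0
    case pos =>
      rw [if_pos hb]
      by_cases hik : i = k
      · rw [hik]
        constructor
        · intro hc1
          exact le_of_lt (lt_of_lt_of_le hb (hmin (2 * k + 1) (Or.inl rfl) (by push_cast; omega)))
        · intro hc2
          exact le_of_lt (lt_of_lt_of_le hb (hmin (2 * k + 2) (Or.inr rfl) (by push_cast; omega)))
      · exact H i hi hik
    case neg =>
    rw [if_neg hb]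
    have hk : k < arr.length := by omega
    have hjlen : j < arr.length := by rw [hjd]; split <;> omega
    have hjval : j = 2 * k + 1 ∨ j = 2 * k + 2 := by rw [hjd]; split <;> omega
    have hjN : (j : Int) ≤ N := by
      rcases (em (2 * (k : Int) + 1 < N ∧ arr.getD (2 * k + 2) 0 < arr.getD (2 * k + 1) 0)) with hc | hc
      · obtain ⟨hc1, hc2⟩ := hc
        have hj2 : j = 2 * k + 2 := by rw [hjd, if_pos ⟨hc1, hc2⟩]
        push_cast [hj2]; omega
      · have hj1 : j = 2 * k + 1 := by rw [hjd, if_neg hc]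
        push_cast [hj1]; omega
    have hle : arr.getD j 0 ≤ arr.getD k 0 := not_lt.mp hb
    have G := getD_swap arr k j hk hjlen
    have hjk : k < j := by omega
    refine ih _ _ lo (by omega) (by simpa using hN) (by omega) ?_ ?_ i hi
    · -- H': heap property everywhere (≥ lo) except at j, on the swapped array
      intro i' hi' hij'
      by_cases hik' : i' = k
      · rw [hik']
        constructor
        · intro hc1
          rw [G k, G (2 * k + 1), if_neg (by omega : ¬ (k = j)), if_pos rfl]
          by_cases hcj : 2 * k + 1 = j
          · rw [if_pos hcj]; exact hle
          · rw [if_neg hcj, if_neg (by omega : ¬ 2 * k + 1 = k)]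
            exact hmin (2 * k + 1) (Or.inl rfl) (by push_cast; omega)
        · intro hc2
          rw [G k, G (2 * k + 2), if_neg (by omega : ¬ (k = j)), if_pos rfl]
          by_cases hcj : 2 * k + 2 = j
          · rw [if_pos hcj]; exact hle
          · rw [if_neg hcj, if_neg (by omega : ¬ 2 * k + 2 = k)]
            exact hmin (2 * k + 2) (Or.inr rfl) (by push_cast; omega)
      · -- i' ≠ k, i' ≠ j
        have hgi : ((arr.set k (arr.getD j 0)).set j (arr.getD k 0)).getD i' 0 = arr.getD i' 0 := by
          rw [G i', if_neg hij', if_neg hik']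
        constructor
        · intro hc1
          rw [hgi, G (2 * i' + 1)]
          by_cases hcj : 2 * i' + 1 = j
          · exfalso; rcases hjval with hj' | hj' <;> omega
          · rw [if_neg hcj]
            by_cases hck : 2 * i' + 1 = k
            · rw [if_pos hck]
              rcases hjval with hj' | hj'
              · rw [hj']; exact (HP i' hi' (by omega)).1 h
              · rw [hj']
                exact (HP i' hi' (by omega)).2 (by rw [hj'] at hjN; push_cast at hjN ⊢; omega)
            · rw [if_neg hck]
              exact (H i' hi' hik').1 hc1
        · intro hc2
          rw [hgi, G (2 * i' + 2)]
          by_cases hcj : 2 * i' + 2 = j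
          · exfalso; rcases hjval with hj' | hj' <;> omega
          · rw [if_neg hcj]
            by_cases hck : 2 * i' + 2 = k
            · rw [if_pos hck]
              rcases hjval with hj' | hj'
              · rw [hj']; exact (HP i' hi' (by omega)).1 h
              · rw [hj']
                exact (HP i' hi' (by omega)).2 (by rw [hj'] at hjN; push_cast at hjN ⊢; omega)
            · rw [if_neg hck]
              exact (H i' hi' hik').2 hc2
    · -- HP': the parent of j (= k) is ≤ j's children on the swapped array
      intro p hp hpj
      have hpk : p = k := by rcases hjval with hj' | hj' <;> omega
      have hjne : j ≠ k := by omega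
      have hHj := H j (by omega) hjne
      rw [hpk]
      constructor
      · intro hc1
        rw [G k, if_neg (by omega : ¬ (k = j)), if_pos rfl, G (2 * j + 1),
            if_neg (by omega : ¬ 2 * j + 1 = j), if_neg (by omega : ¬ 2 * j + 1 = k)]
        exact hHj.1 hc1
      · intro hc2
        rw [G k, if_neg (by omega : ¬ (k = j)), if_pos rfl, G (2 * j + 2),
            if_neg (by omega : ¬ 2 * j + 2 = j), if_neg (by omega : ¬ 2 * j + 2 = k)]
        exact hHj.2 hc2

theorem hcLoopA_length (fuel : Nat) (arr : List Int) (N k : Int) :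
    (hcLoopA fuel arr N k).length = arr.length := by
  induction fuel generalizing arr k with
  | zero => rfl
  | succ fuel ih =>
    rw [hcLoopA]
    by_cases h : 0 ≤ k
    · rw [if_pos h, ih, sinkA_length]
    · rw [if_neg h]

theorem hcLoopA_perm (fuel : Nat) (arr : List Int) (N k : Int) (hN : N < arr.length) :
    (hcLoopA fuel arr N k).Perm arr := by
  induction fuel generalizing arr k with
  | zero => rfl
  | succ fuel ih =>
    rw [hcLoopA]
    by_cases h : 0 ≤ k
    · rw [if_pos h]
      exact (ih _ _ (by rw [sinkA_length]; exact hN)).trans (sinkA_perm _ arr _ N hN)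
    · rw [if_neg h]

theorem hcLoopA_heap (fuel : Nat) (arr : List Int) (N k : Int) (hN : N < arr.length)
    (hf : k < (fuel : Int))
    (H : ∀ i : Nat, k < (i : Int) → heapAt arr N i) :
    ∀ i : Nat, heapAt (hcLoopA fuel arr N k) N i := by
  induction fuel generalizing arr k with
  | zero =>
    intro i
    exact H i (by omega)
  | succ fuel ih =>
    intro i
    rw [hcLoopA]
    by_cases h : 0 ≤ k
    case neg => rw [if_neg h]; exact H i (by omega)
    case pos =>
    rw [if_pos h]
    refine ih _ _ (by rw [sinkA_length]; exact hN) (by omega) ?_ i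
    intro i' hi'
    have hik : k.toNat ≤ i' := by omega
    refine sinkA_heap (N.toNat + 1) arr k.toNat N k.toNat (by omega) hN le_rfl ?_ ?_ i' hik
    · intro i'' h1 h2
      exact H i'' (by omega)
    · intro p hp hpe
      exfalso; omega

theorem heap_min (arr : List Int) (hh : ∀ i : Nat, heapAt arr ((arr.length : Int) - 1) i) :
    ∀ i : Nat, i < arr.length → arr.getD 0 0 ≤ arr.getD i 0 := by
  intro i
  induction i using Nat.strong_induction_on with
  | _ i ih =>
    intro hi
    rcases Nat.eq_zero_or_pos i with rfl | hpos
    · exact le_refl _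
    · have hpar : i = 2 * ((i - 1) / 2) + 1 ∨ i = 2 * ((i - 1) / 2) + 2 := by omega
      have hplt : (i - 1) / 2 < i := by omega
      have h0p : arr.getD 0 0 ≤ arr.getD ((i - 1) / 2) 0 := ih _ hplt (lt_trans hplt hi)
      have hHp := hh ((i - 1) / 2)
      rcases hpar with hc | hc
      · refine le_trans h0p ?_
        have := hHp.1 (by push_cast; omega)
        rw [← hc] at this; exact this
      · refine le_trans h0p ?_
        have := hHp.2 (by push_cast; omega)
        rw [← hc] at this; exact this

theorem foldl_min_spec (l : List Int) (init : Int) :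
    (l.foldl (fun m v => if v < m then v else m) init = init ∨
       l.foldl (fun m v => if v < m then v else m) init ∈ l) ∧
    l.foldl (fun m v => if v < m then v else m) init ≤ init ∧
    ∀ x ∈ l, l.foldl (fun m v => if v < m then v else m) init ≤ x := by
  induction l generalizing init with
  | nil => simp
  | cons x t ih =>
    obtain ⟨h1, h2, h3⟩ := ih (if x < init then x else init)
    simp only [List.foldl_cons]
    refine ⟨?_, ?_, ?_⟩
    · rcases h1 with h | h
      · rw [h]; split_ifs with hx
        · right; exact List.mem_cons_self
        · left; rfl
      · right; exact List.mem_cons_of_mem _ h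
    · refine le_trans h2 ?_; split_ifs with hx
      · exact le_of_lt hx
      · exact le_refl _
    · intro y hy
      rcases List.mem_cons.mp hy with rfl | hy'
      · refine le_trans h2 ?_; split_ifs with hx
        · exact le_refl _
        · exact not_lt.mp hx
      · exact h3 y hy'

theorem foldl_pair (d : PySem.Dict Int Int) (l : List Int) (a : PySem.Dict Int Int) (b : List Int) :
    l.foldl (fun (st : PySem.Dict Int Int × List Int) key =>
        (st.1.insert (d.getD key 0) key, st.2 ++ [d.getD key 0])) (a, b)
      = (l.foldl (fun acc key => acc.insert (d.getD key 0) key) a,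
         b ++ l.map (fun key => d.getD key 0)) := by
  induction l generalizing a b with
  | nil => simp
  | cons x t ih => simp [ih]

theorem keys_map_getD (dis : List (Int × Int)) (h : (dis.map Prod.fst).Nodup) :
    (PySem.Dict.mk dis).keys.map (fun k => (PySem.Dict.mk dis).getD k 0) = (PySem.Dict.mk dis).values := by
  induction dis with
  | nil => rfl
  | cons p t ih =>
    obtain ⟨a, b⟩ := p
    simp only [List.map_cons, List.nodup_cons, List.mem_map] at h
    show (a :: t.map Prod.fst).map (fun k => (PySem.Dict.mk ((a, b) :: t)).getD k 0)
        = b :: t.map Prod.snd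
    rw [List.map_cons]
    have hhead : (PySem.Dict.mk ((a, b) :: t)).getD a 0 = b := by
      simp [PySem.Dict.getD, PySem.Dict.get?]
    have htail : (t.map Prod.fst).map (fun k => (PySem.Dict.mk ((a, b) :: t)).getD k 0)
        = (t.map Prod.fst).map (fun k => (PySem.Dict.mk t).getD k 0) := by
      refine List.map_congr_left ?_
      intro k hkmem
      have hka : k ≠ a := by
        intro hkeq
        exact h.1 (by
          obtain ⟨q, hq1, hq2⟩ := List.mem_map.mp hkmem
          exact ⟨q, hq1, by rw [hq2, hkeq]⟩)
      simp [PySem.Dict.getD, PySem.Dict.get?, List.find?_cons_of_neg, Ne.symm hka]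
    rw [hhead, htail]
    have := ih h.2
    simpa [PySem.Dict.keys, PySem.Dict.values] using this

-- Top of the constructed heap = result of the linear minimum scan.
theorem heapTop_eq_min (L : List Int) (hne : L ≠ []) :
    (heapConstructA L).getD 0 0 =
      (PySem.List.slice L (some 1) none).foldl (fun m v => if v < m then v else m) (L.getD 0 0) := by
  obtain ⟨a, t, rfl⟩ := List.exists_cons_of_ne_nil hne
  rw [PySem.List.slice_from_one]
  have hlen : 0 < (a :: t).length := by simp
  have hNlt : ((a :: t).length : Int) - 1 < ((a :: t).length : Int) := by omega
  rw [heapConstructA]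
  set N : Int := ((a :: t).length : Int) - 1 with hN
  set q : Int := PySem.Int.floordiv N 2 with hqdef
  set res : List Int := hcLoopA ((a :: t).length + 1) (a :: t) N q with hres
  have hq : q * 2 ≤ N ∧ N < (q + 1) * 2 :=
    (PySem.Int.floordiv_eq_iff_of_pos (by norm_num : (0 : Int) < 2)).mp hqdef.symm
  have hperm : res.Perm (a :: t) := hcLoopA_perm _ _ _ _ (by omega)
  have hheapAll : ∀ i : Nat, heapAt res N i := by
    refine hcLoopA_heap _ _ _ _ (by omega) (by omega) ?_
    intro i hi
    exact ⟨fun hc => absurd hc (by omega), fun hc => absurd hc (by omega)⟩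
  have hreslen : res.length = (a :: t).length := hcLoopA_length _ _ _ _
  have hheap : ∀ i : Nat, heapAt res ((res.length : Int) - 1) i := by
    intro i
    have : ((res.length : Int) - 1) = N := by rw [hreslen]
    rw [this]; exact hheapAll i
  have hminres := heap_min res hheap
  have h0lt : 0 < res.length := by omega
  have h0mem : res.getD 0 0 ∈ (a :: t) := by
    refine hperm.mem_iff.mp ?_
    rw [List.getD_eq_getElem res 0 h0lt]
    exact List.getElem_mem _
  have h0le : ∀ x ∈ (a :: t), res.getD 0 0 ≤ x := by
    intro x hx
    obtain ⟨i, hilt, hie⟩ := List.mem_iff_getElem.mp (hperm.mem_iff.mpr hx)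
    have := hminres i hilt
    rw [List.getD_eq_getElem res 0 hilt] at this
    rw [hie] at this
    exact this
  obtain ⟨hm1, hm2, hm3⟩ := foldl_min_spec t a
  have hgD : (a :: t).getD 0 0 = a := rfl
  have htail : (a :: t).tail = t := rfl
  rw [htail, hgD]
  set m : Int := t.foldl (fun m v => if v < m then v else m) a with hm
  have hmmem : m ∈ (a :: t) := by
    rcases hm1 with h' | h'
    · rw [h']; exact List.mem_cons_self
    · exact List.mem_cons_of_mem _ h'
  have hmle : ∀ x ∈ (a :: t), m ≤ x := by
    intro x hx
    rcases List.mem_cons.mp hx with rfl | hx'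
    · exact hm2
    · exact hm3 x hx'
  exact le_antisymm (h0le m hmmem) (hmle _ h0mem)

-- ===== VERDICT (by name: the statement is the Claim_ definition above) =====
theorem minHeapPop_spec : Claim_equal_minHeapPop := by
  intro dis _ hpre
  obtain ⟨hne, hnodup⟩ := hpre
  show minHeapPop dis = minHeapPop_alt dis
  rw [minHeapPop, minHeapPop_alt, foldl_pair]
  simp only [List.nil_append]
  rw [keys_map_getD dis hnodup]
  have hvne : (PySem.Dict.mk dis).values ≠ [] := by
    obtain ⟨p, t, rfl⟩ := List.exists_cons_of_ne_nil hne
    simp [PySem.Dict.values]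
  rw [heapTop_eq_min _ hvne]
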